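-- pv_equiv track=rewrite | github.com/armanvanr/Hackerrank | HR_Tests/Test2/N1_Ad_Rotation.py | change_ads
-- ===== SOURCE A (Python) =====
-- def change_ads(base10):  # 8/8
--     base2 = bin(base10)[2:]
--     str1 = ""
--     for i in range(len(base2)):
--         if base2[i] == "0":
--             str1 += "1"
--         else:
--             str1 += "0"
--     return int("0b" + str1, base=2)
-- ===== SOURCE B (Python) =====
-- def change_ads(base10):
--     # A's bin(n)[2:] keeps a stray 'b' for negative n, which flips to a harmless
--     # leading '0': on every input A returns the bitwise complement of abs(n)
--     # over its bit length.  Compute that directly with one XOR against an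
--     # all-ones mask instead of building and flipping a binary string.
--     m = abs(base10)
--     return m ^ ((1 << (m.bit_length() or 1)) - 1)
-- ===== Notes on version B (the rewrite author's own statement) =====
-- stated objective: simpler
-- what changed: Replaces A's binary-string construction and per-character flip loop with a single closed-form XOR of abs(base10) against an all-ones mask of width bit_length (or 1 for zero); abs captures A's uniform behaviour on negatives, where the stray 'b' of bin(n)[2:] flips to a harmless leading '0'.
import Mathlib
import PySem

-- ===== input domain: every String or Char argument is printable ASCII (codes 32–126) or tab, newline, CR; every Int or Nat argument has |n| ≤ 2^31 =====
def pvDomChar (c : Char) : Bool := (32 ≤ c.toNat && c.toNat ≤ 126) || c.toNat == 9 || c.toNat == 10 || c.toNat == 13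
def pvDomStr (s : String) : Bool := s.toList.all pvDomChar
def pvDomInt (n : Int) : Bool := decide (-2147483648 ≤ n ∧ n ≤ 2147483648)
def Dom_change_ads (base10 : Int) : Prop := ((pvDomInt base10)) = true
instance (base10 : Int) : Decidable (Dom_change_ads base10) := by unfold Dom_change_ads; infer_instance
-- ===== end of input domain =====

-- B replaces A's binary-string construction and per-character flip loop with one closed-form
-- XOR of abs(base10) against an all-ones mask of its bit width (objective: simpler); exact
-- equivalence on all inputs (for negative n the stray 'b' of bin(n)[2:] flips to a leading '0').


-- ===== PORT A =====
-- most-significant-first binary digits of a Nat (empty for 0), as Python's bin builds them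
def pvBits (n : Nat) : List Char :=
  if _h : n = 0 then []
  else pvBits (n / 2) ++ [if n % 2 = 1 then '1' else '0']
decreasing_by exact Nat.div_lt_self (Nat.pos_of_ne_zero (by assumption)) (by norm_num)

-- digits part of Python's bin(n) for n ≥ 0 (bin(0) = '0b0')
def pvBinDigits (n : Nat) : List Char := if n = 0 then ['0'] else pvBits n

def change_ads (base10 : Int) : Int :=
  -- base2 = bin(base10)[2:]  (bin gives '-0b…' for negative input, '0b…' otherwise)
  let binS : List Char :=
    if base10 < 0 then '-' :: '0' :: 'b' :: pvBinDigits base10.natAbs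
    else '0' :: 'b' :: pvBinDigits base10.toNat
  let base2 := binS.drop 2
  -- the flip loop building str1 character by character
  let str1 := base2.foldl (fun s c => s ++ [if c = '0' then '1' else '0']) []
  -- int("0b" + str1, base=2): str1 holds only '0'/'1' here, parsed MSB-first
  Int.ofNat (str1.foldl (fun a c => 2 * a + (if c = '1' then 1 else 0)) 0)

-- ===== PORT B =====
-- int.bit_length() of a Nat
def pvBitLength (n : Nat) : Nat :=
  if _h : n = 0 then 0
  else pvBitLength (n / 2) + 1
decreasing_by exact Nat.div_lt_self (Nat.pos_of_ne_zero (by assumption)) (by norm_num)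

def change_ads_alt (base10 : Int) : Int :=
  -- m = abs(base10); nbits = m.bit_length() or 1; m ^ ((1 << nbits) - 1)
  let m := base10.natAbs
  let bl := pvBitLength m
  let nbits := if bl = 0 then 1 else bl
  Int.ofNat (m ^^^ (1 <<< nbits - 1))

-- ===== PRECONDITION & SPEC =====
def Spec_change_ads (base10 : Int) (out : Int) : Prop := out = change_ads_alt base10
instance (base10 : Int) (out : Int) : Decidable (Spec_change_ads base10 out) := by unfold Spec_change_ads; infer_instance

-- ===== CLAIM (what is proved, stated in full; the proofs are below) =====
def Claim_equal_change_ads : Prop := ∀ (base10 : Int), Dom_change_ads base10 → Spec_change_ads base10 (change_ads base10)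

-- ===== LEMMAS AND PROOFS =====

-- the flip loop is a map
def pvFlip (c : Char) : Char := if c = '0' then '1' else '0'

theorem pvFoldFlip (l : List Char) (s : List Char) :
    l.foldl (fun s c => s ++ [if c = '0' then '1' else '0']) s = s ++ l.map pvFlip := by
  induction l generalizing s with
  | nil => simp
  | cons c t ih => simp [ih, pvFlip]

-- every Nat is below 2 ^ its bit length
theorem pvLtPow : ∀ m : Nat, m < 2 ^ pvBitLength m := by
  intro m
  induction m using Nat.strong_induction_on with
  | _ m ih =>
    by_cases h : m = 0
    · subst h; rw [pvBitLength.eq_def]; simp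
    · rw [pvBitLength.eq_def, dif_neg h]
      have := ih (m / 2) (Nat.div_lt_self (Nat.pos_of_ne_zero h) (by norm_num))
      have h2 : 2 ^ (pvBitLength (m / 2) + 1) = 2 * 2 ^ pvBitLength (m / 2) := by ring
      omega

-- value of the flipped digit string, MSB-first fold with accumulator a
theorem pvFlipVal : ∀ m : Nat, m ≠ 0 → ∀ a : Nat,
    ((pvBits m).map pvFlip).foldl (fun a c => 2 * a + (if c = '1' then 1 else 0)) a
      = a * 2 ^ pvBitLength m + (2 ^ pvBitLength m - 1 - m) := by
  intro m
  induction m using Nat.strong_induction_on with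
  | _ m ih =>
    intro hm a
    rw [pvBits.eq_def, dif_neg hm, pvBitLength.eq_def, dif_neg hm]
    by_cases h2 : m / 2 = 0
    · -- m = 1
      have hm1 : m = 1 := by omega
      subst hm1
      rw [pvBits.eq_def]
      norm_num
      rw [show pvFlip '1' = '0' from rfl, if_neg (by decide : ¬ ('0' : Char) = '1'),
        pvBitLength.eq_def]
      norm_num
      ring
    · have hlt := pvLtPow (m / 2)
      have ihh := ih (m / 2) (Nat.div_lt_self (Nat.pos_of_ne_zero hm) (by norm_num)) h2 a
      rw [List.map_append, List.foldl_append, ihh]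
      have hpow : 2 ^ (pvBitLength (m / 2) + 1) = 2 * 2 ^ pvBitLength (m / 2) := by ring
      have ha : a * 2 ^ (pvBitLength (m / 2) + 1) = 2 * (a * 2 ^ pvBitLength (m / 2)) := by
        rw [hpow]; ring
      rw [ha]
      by_cases hp : m % 2 = 1
      · rw [if_pos hp]
        simp only [List.map_cons, List.map_nil, List.foldl_cons, List.foldl_nil, pvFlip]
        rw [if_neg (by decide : ¬ ('1' : Char) = '0'), if_neg (by decide : ¬ ('0' : Char) = '1')]
        omega
      · rw [if_neg hp]
        simp only [List.map_cons, List.map_nil, List.foldl_cons, List.foldl_nil, pvFlip]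
        norm_num
        omega

-- xor against an all-ones mask is subtraction from the mask
theorem pvXorMask : ∀ (k m : Nat), m < 2 ^ k → m ^^^ (2 ^ k - 1) = 2 ^ k - 1 - m := by
  intro k
  induction k with
  | zero => intro m h; interval_cases m; decide
  | succ k ih =>
    intro m h
    have h1 : 1 ≤ 2 ^ k := Nat.one_le_two_pow
    have h2 : 2 ^ (k + 1) = 2 * 2 ^ k := by ring
    have hlt : m / 2 < 2 ^ k := by omega
    have hmask : 2 ^ (k + 1) - 1 = Nat.bit true (2 ^ k - 1) := by
      simp only [Nat.bit_true]; omega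
    by_cases hp : m % 2 = 1
    · have hb : m = Nat.bit true (m / 2) := by
        simp only [Nat.bit_true]; omega
      rw [hmask]
      conv_lhs => rw [hb]
      rw [Nat.xor_bit, ih _ hlt]
      simp only [bne_self_eq_false, Nat.bit_false]
      omega
    · have hb : m = Nat.bit false (m / 2) := by
        simp only [Nat.bit_false]; omega
      rw [hmask]
      conv_lhs => rw [hb]
      rw [Nat.xor_bit, ih _ hlt]
      simp only [bne, Nat.bit_true]
      norm_num
      omega

theorem pvNatAbsOfNat (m : Nat) : (Int.ofNat m).natAbs = m := rfl

theorem pvToNatOfNat (m : Nat) : (Int.ofNat m).toNat = m := rfl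

-- the common core: parsing the flipped digits of m is m XOR the all-ones mask of its width
theorem pvCore : ∀ m : Nat,
    ((pvBinDigits m).map pvFlip).foldl (fun a c => 2 * a + (if c = '1' then 1 else 0)) 0
      = m ^^^ (1 <<< (if pvBitLength m = 0 then 1 else pvBitLength m) - 1) := by
  intro m
  by_cases hm : m = 0
  · subst hm
    rw [pvBitLength.eq_def]
    decide
  · have hbl : ¬ pvBitLength m = 0 := by
      rw [pvBitLength.eq_def, dif_neg hm]; omega
    simp only [pvBinDigits, if_neg hm, if_neg hbl]
    rw [pvFlipVal m hm 0, Nat.shiftLeft_eq, one_mul, pvXorMask _ _ (pvLtPow m)]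
    simp

-- ===== VERDICT (by name: the statement is the Claim_ definition above) =====
theorem change_ads_spec : Claim_equal_change_ads := by
  intro base10 _
  unfold Spec_change_ads change_ads change_ads_alt
  cases base10 with
  | ofNat m =>
    have hneg : ¬ (Int.ofNat m < 0) := Int.not_lt.mpr (Int.natCast_nonneg m)
    simp only [if_neg hneg, List.drop, pvNatAbsOfNat, pvToNatOfNat]
    rw [pvFoldFlip, List.nil_append, pvCore]
  | negSucc a =>
    have hneg : Int.negSucc a < 0 := Int.negSucc_lt_zero a
    simp only [if_pos hneg, List.drop, show (Int.negSucc a).natAbs = a + 1 from rfl]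
    rw [pvFoldFlip, List.nil_append]
    simp only [List.map_cons, List.foldl_cons]
    rw [show pvFlip 'b' = '0' from rfl, if_neg (by decide : ¬ ('0' : Char) = '1')]
    norm_num
    rw [pvCore]
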